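-- pv_equiv track=rewrite | github.com/Franklyc/Hallucination-Direction-Ablation | experiments/scripts/build_reviewed_mechanistic_dataset.py | balance_labels
-- ===== SOURCE A (Python) =====
-- from collections import Counter
--
-- def balance_labels(rows):
--     counts = Counter(row["label"] for row in rows)
--     if not counts:
--         return rows
--     target = min(counts.values())
--     kept = Counter()
--     out = []
--     for row in rows:
--         label = row["label"]
--         if kept[label] >= target:
--             continue
--         out.append(row)
--         kept[label] += 1
--     return out
-- ===== SOURCE B (Python) =====
-- def balance_labels(rows):
--     groups = {}
--     for i, row in enumerate(rows):
--         groups.setdefault(row["label"], []).append(i)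
--     if not groups:
--         return rows
--     target = min(len(ix) for ix in groups.values())
--     keep = {i for ix in groups.values() for i in ix[:target]}
--     return [row for i, row in enumerate(rows) if i in keep]
-- ===== Notes on version B (the rewrite author's own statement) =====
-- stated objective: alternative
-- what changed: B replaces A's emission-time running Counter with a precomputed index table: a first pass groups row indices by label, the first `target` indices of each group form a keep-set, and a second pass filters rows by index.
import Mathlib
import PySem

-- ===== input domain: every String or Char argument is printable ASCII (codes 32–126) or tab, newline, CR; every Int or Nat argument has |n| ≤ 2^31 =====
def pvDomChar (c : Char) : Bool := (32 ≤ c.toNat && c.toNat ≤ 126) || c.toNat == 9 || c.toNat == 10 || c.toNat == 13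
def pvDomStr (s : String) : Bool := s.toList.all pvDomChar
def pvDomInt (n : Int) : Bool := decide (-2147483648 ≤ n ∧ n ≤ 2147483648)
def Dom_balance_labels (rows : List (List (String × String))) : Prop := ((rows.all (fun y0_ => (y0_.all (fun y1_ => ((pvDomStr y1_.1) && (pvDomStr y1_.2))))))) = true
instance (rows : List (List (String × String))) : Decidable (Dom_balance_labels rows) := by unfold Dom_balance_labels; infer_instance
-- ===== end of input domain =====

-- B precomputes, per label, the row-index lists and a keep-index set in a first pass, then filters by
-- index in a second pass — instead of A's running Counter deciding during emission ("alternative").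

-- ===== PORT A =====
-- row["label"] (shared accessor; Pre_ guarantees the key is present, so the .getD "" default is never used)
def pvLabel (row : List (String × String)) : String :=
  ((PySem.Dict.mk row).get? "label").getD ""

-- the body of A's `for row in rows` loop (state = (out, kept))
def pvStepA (target : Int)
    (s : List (List (String × String)) × PySem.Dict String Int)
    (row : List (String × String)) :
    List (List (String × String)) × PySem.Dict String Int :=
  let label := pvLabel row
  if s.2.getD label 0 ≥ target then s
  else (s.1 ++ [row], s.2.modify label 0 (· + 1))

def balance_labels (rows : List (List (String × String))) : List (List (String × String)) :=
  let counts : PySem.Dict String Int := PySem.Dict.counter (rows.map pvLabel)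
  if counts.items = [] then rows
  else
    let target : Int := (PySem.List.min? counts.values (fun v => v)).getD 0
    (rows.foldl (pvStepA target)
      (([] : List (List (String × String))), (PySem.Dict.empty : PySem.Dict String Int))).1

-- ===== PORT B =====
def balance_labels_alt (rows : List (List (String × String))) : List (List (String × String)) :=
  let groups : PySem.Dict String (List Int) :=
    (PySem.List.enumerate rows 0).foldl
      (fun d p => d.modify (pvLabel p.2) [] (· ++ [p.1])) PySem.Dict.empty
  if groups.items = [] then rows
  else
    let target : Int :=
      (PySem.List.min? (groups.values.map (fun ix => (ix.length : Int))) (fun v => v)).getD 0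
    let keep : PySem.Set Int :=
      PySem.Set.ofList (groups.values.flatMap (fun ix => PySem.List.slice ix none (some target)))
    ((PySem.List.enumerate rows 0).filter (fun p => keep.contains p.1)).map (·.2)

-- ===== PRECONDITION & SPEC =====
-- Pre_ excludes exactly the rows with no "label" key, on which the Python A raises KeyError.
def Pre_balance_labels (rows : List (List (String × String))) : Prop :=
  ∀ row ∈ rows, "label" ∈ row.map Prod.fst
instance (rows : List (List (String × String))) : Decidable (Pre_balance_labels rows) := by
  unfold Pre_balance_labels; infer_instance
def pvWitness_balance_labels : (List (List (String × String))) :=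
  [[("label", "a"), ("text", "x")], [("label", "b")], [("label", "a")]]

def Spec_balance_labels (rows : List (List (String × String))) (out : List (List (String × String))) : Prop := out = balance_labels_alt rows
instance (rows : List (List (String × String))) (out : List (List (String × String))) : Decidable (Spec_balance_labels rows out) := by unfold Spec_balance_labels; infer_instance

-- ===== CLAIM (what is proved, stated in full; the proofs are below) =====
def Claim_equal_balance_labels : Prop := ∀ (rows : List (List (String × String))), Dom_balance_labels rows → Pre_balance_labels rows → Spec_balance_labels rows (balance_labels rows)

-- ===== LEMMAS AND PROOFS =====

-- the index list of label c, as B's groups dict stores it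
def pvIdxs (rows : List (List (String × String))) (c : String) : List Int :=
  ((PySem.List.enumerate rows 0).filter (fun p => pvLabel p.2 == c)).map (·.1)

-- the common selection predicate: keep row #i iff fewer than `target` earlier rows share its label
def pvPred (rows : List (List (String × String))) (target : Int) (p : Int × List (String × String)) : Bool :=
  decide ((((rows.take p.1.toNat).map pvLabel).count (pvLabel p.2) : Int) < target)

theorem pv_count_enumerate (zs : List (List (String × String))) (s : Int) (k : String) :
    (PySem.List.enumerate zs s).countP (fun p => pvLabel p.2 == k) = (zs.map pvLabel).count k := by
  induction zs generalizing s with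
  | nil => simp [PySem.List.enumerate_nil]
  | cons z zs ih =>
    simp [PySem.List.enumerate_cons, List.countP_cons, List.count_cons, ih]

theorem pv_groups_getD (rows : List (List (String × String))) (c : String) :
    ((PySem.List.enumerate rows 0).foldl
      (fun d p => d.modify (pvLabel p.2) [] (· ++ [p.1])) PySem.Dict.empty).getD c []
    = pvIdxs rows c := by
  have h1 : ((PySem.List.enumerate rows 0).foldl
      (fun d p => d.modify (pvLabel p.2) [] (· ++ [p.1])) PySem.Dict.empty)
      = (((PySem.List.enumerate rows 0).map (fun p => (pvLabel p.2, p.1))).foldl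
          (fun d q => d.modify q.1 [] (· ++ [q.2])) PySem.Dict.empty) := by
    rw [List.foldl_map]
  rw [h1, PySem.Dict.getD_foldl_modify_append]
  simp [pvIdxs, List.filter_map, Function.comp_def]

theorem pv_set_update_nil {α : Type} [BEq α] (xs : List α) :
    PySem.Set.update ([] : List α) xs = PySem.Set.ofList xs := by rfl

theorem pv_groups_keys (rows : List (List (String × String))) :
    ((PySem.List.enumerate rows 0).foldl
      (fun d p => d.modify (pvLabel p.2) [] (· ++ [p.1])) PySem.Dict.empty).keys
    = PySem.Set.ofList (rows.map pvLabel) := by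
  have h := PySem.Dict.keys_foldl_modify_key (l := PySem.List.enumerate rows 0)
      (key := fun p : Int × List (String × String) => pvLabel p.2)
      (d0 := ([] : List Int)) (f := fun d p => (· ++ [p.1])) (d := PySem.Dict.empty)
  rw [h]
  simp [pv_set_update_nil]
  congr 1
  rw [show (fun p : Int × List (String × String) => pvLabel p.2) = pvLabel ∘ (·.2) from rfl,
    ← List.map_map, PySem.List.map_snd_enumerate]

theorem pv_idxs_len (rows : List (List (String × String))) (c : String) :
    (pvIdxs rows c).length = (rows.map pvLabel).count c := by
  simp [pvIdxs, ← pv_count_enumerate rows 0 c, List.countP_eq_length_filter]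

theorem pv_values_eq (rows : List (List (String × String))) :
    (((PySem.List.enumerate rows 0).foldl
      (fun d p => d.modify (pvLabel p.2) [] (· ++ [p.1])) PySem.Dict.empty).values.map
        (fun ix => (ix.length : Int)))
    = (PySem.Dict.counter (rows.map pvLabel)).values := by
  have hnd : ((PySem.List.enumerate rows 0).foldl
      (fun d p => d.modify (pvLabel p.2) [] (· ++ [p.1])) PySem.Dict.empty).keys.Nodup := by
    exact PySem.Dict.nodup_keys_foldl_modify_key _ _ _ _ _ (by simp)
  rw [PySem.Dict.values_eq_map_keys _ hnd ([] : List Int)]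
  have hc : (PySem.Dict.counter (rows.map pvLabel)).values
      = (PySem.Set.ofList (rows.map pvLabel)).map (fun k => ((rows.map pvLabel).count k : Int)) := by
    have := PySem.Dict.items_counter (rows.map pvLabel)
    simp [PySem.Dict.values, this, List.map_map]
  rw [hc, pv_groups_keys, List.map_map]
  apply List.map_congr_left
  intro k _
  simp [pv_groups_getD, pv_idxs_len]

theorem pv_mem_enumfilter {zs : List (List (String × String))} {s x : Int}
    {q : Int × List (String × String) → Bool}
    (h : x ∈ ((PySem.List.enumerate zs s).filter q).map (·.1)) :
    ∃ (m : Nat) (hm : m < zs.length), x = s + m ∧ q (s + m, zs[m]) = true := by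
  simp only [List.mem_map, List.mem_filter] at h
  obtain ⟨p, ⟨hpe, hq⟩, hx⟩ := h
  rw [PySem.List.mem_enumerate_iff] at hpe
  obtain ⟨m, hm, rfl⟩ := hpe
  exact ⟨m, hm, hx.symm, hq⟩

theorem pv_keep_mem (rows : List (List (String × String))) (target : Int)
    (htp : 1 ≤ target) (j : Nat) (hj : j < rows.length) :
    ((PySem.Set.ofList (((PySem.List.enumerate rows 0).foldl
        (fun d p => d.modify (pvLabel p.2) [] (· ++ [p.1]))
        PySem.Dict.empty).values.flatMap
          (fun ix => PySem.List.slice ix none (some target)))).contains ((j : Int)))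
    = pvPred rows target ((j : Int), rows[j]) := by
  set G := (PySem.List.enumerate rows 0).foldl
      (fun d p => d.modify (pvLabel p.2) [] (· ++ [p.1])) PySem.Dict.empty with hG
  set l := pvLabel rows[j] with hl
  have hnd : G.keys.Nodup :=
    PySem.Dict.nodup_keys_foldl_modify_key _ _ _ _ _ (by simp)
  have hvals : G.values = (PySem.Set.ofList (rows.map pvLabel)).map (pvIdxs rows) := by
    rw [PySem.Dict.values_eq_map_keys _ hnd ([] : List Int), pv_groups_keys]
    exact List.map_congr_left (fun k _ => pv_groups_getD rows k)
  have hsplit : PySem.List.enumerate rows 0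
      = PySem.List.enumerate (rows.take j) 0
        ++ (((j : Nat) : Int), rows[j]) :: PySem.List.enumerate (rows.drop (j+1)) ((j : Int) + 1) := by
    conv_lhs => rw [← List.take_append_drop j rows]
    rw [PySem.List.enumerate_append, List.drop_eq_getElem_cons hj, PySem.List.enumerate_cons]
    simp [List.length_take, Nat.min_eq_left (Nat.le_of_lt hj)]
  have hidxs : pvIdxs rows l
      = ((PySem.List.enumerate (rows.take j) 0).filter (fun p => pvLabel p.2 == l)).map (·.1)
        ++ ((j : Nat) : Int)
          :: ((PySem.List.enumerate (rows.drop (j+1)) ((j : Int) + 1)).filter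
              (fun p => pvLabel p.2 == l)).map (·.1) := by
    rw [pvIdxs, hsplit]
    simp [List.filter_append, hl]
  set A1 := ((PySem.List.enumerate (rows.take j) 0).filter (fun p => pvLabel p.2 == l)).map (·.1) with hA1
  set A2 := ((PySem.List.enumerate (rows.drop (j+1)) ((j : Int) + 1)).filter
      (fun p => pvLabel p.2 == l)).map (·.1) with hA2
  have hA1len : A1.length = (((rows.take j).map pvLabel).count l) := by
    rw [hA1, List.length_map, ← List.countP_eq_length_filter, pv_count_enumerate]
  have hA1lt : ∀ x ∈ A1, x < (j : Int) := by
    intro x hx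
    obtain ⟨m, hm, rfl, -⟩ := pv_mem_enumfilter hx
    simp at hm ⊢
    omega
  have hkl : ∀ k, ((j : Nat) : Int) ∈ pvIdxs rows k → k = l := by
    intro k hk
    obtain ⟨m, hm, heq, hq⟩ := pv_mem_enumfilter hk
    have : m = j := by omega
    subst this
    exact (eq_of_beq hq).symm
  have hslice : ∀ ix : List Int, PySem.List.slice ix none (some target) = ix.take target.toNat :=
    fun ix => PySem.List.slice_to (xs := ix) (b := target) (by omega)
  rw [Bool.eq_iff_iff, PySem.Set.contains_iff, PySem.Set.mem_ofList, List.mem_flatMap]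
  simp only [pvPred, decide_eq_true_iff, Int.toNat_natCast]
  rw [← hl]
  constructor
  · rintro ⟨ix, hix, hmem⟩
    rw [hslice] at hmem
    rw [hvals] at hix
    obtain ⟨k, -, rfl⟩ := List.mem_map.mp hix
    have hk : k = l := hkl k (List.mem_of_mem_take hmem)
    subst hk
    rw [hidxs, List.take_append] at hmem
    rcases List.mem_append.mp hmem with h1 | h2
    · exact absurd (hA1lt _ (List.mem_of_mem_take h1)) (by simp)
    · by_contra hcon
      have hA : target.toNat - A1.length = 0 := by
        rw [hA1len]
        omega
      simp [hA] at h2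
  · intro h
    refine ⟨pvIdxs rows l, ?_, ?_⟩
    · rw [hvals]
      refine List.mem_map_of_mem ?_
      rw [PySem.Set.mem_ofList, hl]
      exact List.mem_map_of_mem (rows.getElem_mem hj)
    · rw [hslice, hidxs, List.take_append]
      refine List.mem_append.mpr (Or.inr ?_)
      obtain ⟨m, hm⟩ : ∃ m, target.toNat - A1.length = m + 1 :=
        ⟨target.toNat - A1.length - 1, by rw [hA1len]; omega⟩
      rw [hm, List.take_succ_cons]
      exact List.mem_cons_self

theorem pv_foldA (rows : List (List (String × String))) (target : Int) :
    ∀ (rest : List (List (String × String))) (j : Nat) (out : List (List (String × String)))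
      (kept : PySem.Dict String Int),
      rest = rows.drop j →
      (∀ l, kept.getD l 0 = min target ((((rows.take j).map pvLabel).count l : Int))) →
      (rest.foldl (pvStepA target) (out, kept)).1
        = out ++ ((PySem.List.enumerate rest (j : Int)).filter (pvPred rows target)).map (·.2) := by
  intro rest
  induction rest with
  | nil => intro j out kept _ _; simp [PySem.List.enumerate_nil]
  | cons r rest' ih =>
    intro j out kept hrest hkept
    have hj : j < rows.length := by
      by_contra hc
      rw [List.drop_eq_nil_of_le (by omega)] at hrest
      exact List.cons_ne_nil _ _ hrest
    rw [List.drop_eq_getElem_cons hj] at hrest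
    obtain ⟨hr, hrest'⟩ := List.cons_eq_cons.mp hrest
    subst hr
    have htake : List.map pvLabel (rows.take (j+1))
        = List.map pvLabel (rows.take j) ++ [pvLabel rows[j]] := by
      rw [List.take_add_one, List.getElem?_eq_getElem hj, Option.toList_some,
        List.map_append, List.map_cons, List.map_nil]
    have hpred : pvPred rows target ((j : Int), rows[j])
        = decide ((((rows.take j).map pvLabel).count (pvLabel rows[j]) : Int) < target) := by
      simp [pvPred]
    rw [List.foldl_cons, PySem.List.enumerate_cons]
    by_cases hge : target ≤ (((rows.take j).map pvLabel).count (pvLabel rows[j]) : Int)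
    · have hstep : pvStepA target (out, kept) rows[j] = (out, kept) := by
        simp only [pvStepA, hkept (pvLabel rows[j])]
        rw [if_pos (by omega)]
      have hinv : ∀ l, kept.getD l 0
          = min target ((((rows.take (j+1)).map pvLabel).count l : Int)) := by
        intro l
        rw [hkept l, htake, List.count_append]
        by_cases hll : l = pvLabel rows[j]
        · subst hll; simp [← List.map_take]; omega
        · simp [(by simpa using Ne.symm hll : ¬ (pvLabel rows[j] = l))]
      rw [hstep, ih (j+1) out kept (by rw [hrest']) hinv,
        List.filter_cons_of_neg (by rw [hpred]; simpa using hge)]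
      push_cast
      rfl
    · have hstep : pvStepA target (out, kept) rows[j]
          = (out ++ [rows[j]], kept.modify (pvLabel rows[j]) 0 (· + 1)) := by
        simp only [pvStepA, hkept (pvLabel rows[j])]
        rw [if_neg (by omega)]
      have hinv : ∀ l, (kept.modify (pvLabel rows[j]) 0 (· + 1)).getD l 0
          = min target ((((rows.take (j+1)).map pvLabel).count l : Int)) := by
        intro l
        rw [PySem.Dict.getD_modify, hkept l, htake, List.count_append]
        by_cases hll : l = pvLabel rows[j]
        · subst hll; rw [hkept]; simp [← List.map_take]; omega
        · simp [(by simpa using Ne.symm hll : ¬ (pvLabel rows[j] = l)), hll]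
      rw [hstep, ih (j+1) (out ++ [rows[j]]) _ (by rw [hrest']) hinv,
        List.filter_cons_of_pos (by rw [hpred]; simpa using hge)]
      push_cast
      simp

theorem balance_labels_spec' (rows : List (List (String × String))) :
    balance_labels rows = balance_labels_alt rows := by
  match hrows : rows with
  | [] => rfl
  | r0 :: rs =>
    rw [← hrows]
    have hne : rows ≠ [] := by rw [hrows]; exact List.cons_ne_nil _ _
    set G := (PySem.List.enumerate rows 0).foldl
        (fun d p => d.modify (pvLabel p.2) [] (· ++ [p.1])) PySem.Dict.empty with hG
    have hLne : rows.map pvLabel ≠ [] := by simpa using hne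
    have hCkeys : (PySem.Dict.counter (rows.map pvLabel)).keys
        = PySem.Set.ofList (rows.map pvLabel) := PySem.Dict.keys_counter _
    have hCitems : (PySem.Dict.counter (rows.map pvLabel)).items ≠ [] := by
      intro h
      have hkeys : (PySem.Dict.counter (rows.map pvLabel)).keys = [] := by
        simp [PySem.Dict.keys, h]
      rw [hCkeys] at hkeys
      obtain ⟨x, hx⟩ := List.exists_mem_of_ne_nil _ hLne
      have hmem := (PySem.Set.mem_ofList _ _).mpr hx
      rw [hkeys] at hmem
      simp at hmem
    have hGitems : G.items ≠ [] := by
      intro h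
      have hkeys : G.keys = [] := by simp [PySem.Dict.keys, h]
      rw [hG, pv_groups_keys] at hkeys
      obtain ⟨x, hx⟩ := List.exists_mem_of_ne_nil _ hLne
      have hmem := (PySem.Set.mem_ofList _ _).mpr hx
      rw [hkeys] at hmem
      simp at hmem
    set target : Int := (PySem.List.min? (PySem.Dict.counter (rows.map pvLabel)).values (fun v => v)).getD 0 with htarget
    -- target ≥ 1
    have hCvals : (PySem.Dict.counter (rows.map pvLabel)).values
        = (PySem.Set.ofList (rows.map pvLabel)).map (fun k => ((rows.map pvLabel).count k : Int)) := by
      have := PySem.Dict.items_counter (rows.map pvLabel)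
      simp [PySem.Dict.values, this, List.map_map]
    have hvne : (PySem.Dict.counter (rows.map pvLabel)).values ≠ [] := by
      intro h
      exact hCitems (by simpa [PySem.Dict.values] using h)
    have htp : 1 ≤ target := by
      obtain ⟨v, hv⟩ := List.exists_mem_of_ne_nil _ hvne
      obtain ⟨m, hm⟩ : ∃ m, PySem.List.min? (PySem.Dict.counter (rows.map pvLabel)).values (fun v => v) = some m := by
        cases hmin : PySem.List.min? (PySem.Dict.counter (rows.map pvLabel)).values (fun v => v) with
        | none =>
          rw [PySem.List.min?_eq_none_iff] at hmin
          exact absurd hmin hvne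
        | some m => exact ⟨m, rfl⟩
      have hmem := PySem.List.min?_mem hm
      rw [hCvals] at hmem
      obtain ⟨k, hk, rfl⟩ := List.mem_map.mp hmem
      rw [PySem.Set.mem_ofList] at hk
      have hpos : 1 ≤ (rows.map pvLabel).count k := List.count_pos_iff.mpr hk
      rw [htarget, hm]
      simpa using hpos
    -- A side
    have hA : balance_labels rows
        = ((PySem.List.enumerate rows 0).filter (pvPred rows target)).map (·.2) := by
      rw [balance_labels]
      simp only [if_neg hCitems]
      rw [pv_foldA rows target rows 0 [] PySem.Dict.empty (by simp) ?_]
      · simp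
      · intro l
        simp [PySem.Dict.getD_empty]
        omega
    -- B side
    have hB : balance_labels_alt rows
        = ((PySem.List.enumerate rows 0).filter (pvPred rows target)).map (·.2) := by
      have hveq : G.values.map (fun ix => (ix.length : Int))
          = (PySem.Dict.counter (rows.map pvLabel)).values := by
        rw [hG]; exact pv_values_eq rows
      rw [balance_labels_alt]
      simp only [← hG, if_neg hGitems, hveq, ← htarget]
      congr 1
      apply List.filter_congr
      intro p hp
      rw [PySem.List.mem_enumerate_iff] at hp
      obtain ⟨m, hm, rfl⟩ := hp
      simp only [hG]
      simpa using pv_keep_mem rows target htp m hm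
    rw [hA, hB]

-- ===== VERDICT (by name: the statement is the Claim_ definition above) =====
theorem balance_labels_spec : Claim_equal_balance_labels := by
  intro rows _ _
  exact balance_labels_spec' rows
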